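-- pv_equiv track=rewrite | github.com/kurama-a/blokus | blokus_pc.py | is_corner
-- ===== SOURCE A (Python) =====
-- def is_corner(piece, x, y):
--     """"Vérifie si la première pièce placée par chaque joueur est dans un coin"""
--     corners = [(1, 1), (1, 20), (20, 1), (20, 20)]
--     for i in range(len(piece)):
--         for j in range(len(piece[i])):
--             if piece[i][j] == "#":
--                 piece_x, piece_y = x + i, y + j
--                 if (piece_x, piece_y) in corners:
--                     return True
--     return False
-- ===== SOURCE B (Python) =====
-- def is_corner(piece, x, y):
--     for cx, cy in ((1, 1), (1, 20), (20, 1), (20, 20)):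
--         i = cx - x
--         j = cy - y
--         if 0 <= i < len(piece):
--             row = piece[i]
--             if 0 <= j < len(row) and row[j] == "#":
--                 return True
--     return False
-- ===== Notes on version B (the rewrite author's own statement) =====
-- stated objective: simpler
-- what changed: Instead of scanning every cell of the piece and testing the cell's coordinate for membership in the corner list, B probes only the four fixed corner coordinates, computing relative indices with explicit bounds checks.
import Mathlib
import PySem

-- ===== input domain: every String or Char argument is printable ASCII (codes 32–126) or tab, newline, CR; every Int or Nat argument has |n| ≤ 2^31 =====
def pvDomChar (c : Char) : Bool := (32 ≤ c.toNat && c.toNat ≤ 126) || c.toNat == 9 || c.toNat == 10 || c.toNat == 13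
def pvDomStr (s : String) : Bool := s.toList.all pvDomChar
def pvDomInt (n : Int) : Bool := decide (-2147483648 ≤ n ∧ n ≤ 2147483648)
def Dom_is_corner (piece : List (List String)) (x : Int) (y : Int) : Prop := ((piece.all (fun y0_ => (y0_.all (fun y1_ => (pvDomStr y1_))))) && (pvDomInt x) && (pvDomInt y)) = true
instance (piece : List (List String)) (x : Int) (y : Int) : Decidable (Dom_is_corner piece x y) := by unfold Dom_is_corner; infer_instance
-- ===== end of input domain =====

-- B replaces A's full cell scan with membership test in the corner list by a 4-probe indexed lookup at the fixed corner coordinates (different decomposition).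


-- ===== PORT A =====
def pvCorners : List (Int × Int) := [(1, 1), (1, 20), (20, 1), (20, 20)]
-- inner loop: 'for j in range(len(piece[i])): if piece[i][j] == "#": … if (piece_x, piece_y) in corners: return True'
def pvScanRow (row : List String) (px : Int) (y : Int) (j : Int) : Bool :=
  match row with
  | [] => false
  | c :: rest => (c == "#" && pvCorners.contains (px, y + j)) || pvScanRow rest px y (j + 1)
-- outer loop: 'for i in range(len(piece)): …'
def pvScanPiece (piece : List (List String)) (x : Int) (y : Int) (i : Int) : Bool :=
  match piece with
  | [] => false
  | row :: rest => pvScanRow row (x + i) y 0 || pvScanPiece rest x y (i + 1)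
def is_corner (piece : List (List String)) (x : Int) (y : Int) : Bool :=
  pvScanPiece piece x y 0
-- ===== PORT B =====
-- B: for each of the 4 corners, probe piece[cx-x][cy-y] under explicit bounds checks.
def is_corner_alt (piece : List (List String)) (x : Int) (y : Int) : Bool :=
  [((1 : Int), (1 : Int)), (1, 20), (20, 1), (20, 20)].any (fun c =>
    let i := c.1 - x
    let j := c.2 - y
    decide (0 ≤ i) && decide (i < (piece.length : Int)) &&
      (let row := piece.getD i.toNat []
       decide (0 ≤ j) && decide (j < (row.length : Int)) && (row.getD j.toNat "" == "#")))


-- ===== PRECONDITION & SPEC =====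
def Spec_is_corner (piece : List (List String)) (x : Int) (y : Int) (out : Bool) : Prop := out = is_corner_alt piece x y
instance (piece : List (List String)) (x : Int) (y : Int) (out : Bool) : Decidable (Spec_is_corner piece x y out) := by unfold Spec_is_corner; infer_instance

-- ===== CLAIM (what is proved, stated in full; the proofs are below) =====
def Claim_equal_is_corner : Prop := ∀ (piece : List (List String)) (x : Int) (y : Int), Dom_is_corner piece x y → Spec_is_corner piece x y (is_corner piece x y)

-- ===== LEMMAS AND PROOFS =====

lemma pvScanRow_iff (row : List String) (px y j : Int) :
    pvScanRow row px y j = true ↔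
      ∃ l : Nat, ∃ h : l < row.length, row[l] = "#" ∧ (px, y + j + l) ∈ pvCorners := by
  induction row generalizing j with
  | nil => simp [pvScanRow]
  | cons c rest ih =>
    simp only [pvScanRow, Bool.or_eq_true, Bool.and_eq_true, beq_iff_eq,
      List.contains_iff_mem, ih]
    constructor
    · rintro (⟨hc, hm⟩ | ⟨l, hl, hcell, hm⟩)
      · exact ⟨0, by simp, by simpa using hc, by simpa using hm⟩
      · refine ⟨l + 1, by simpa using hl, by simpa using hcell, ?_⟩
        have h : y + j + (l + 1 : Nat) = y + (j + 1) + l := by push_cast; ring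
        rwa [h]
    · rintro ⟨l, hl, hcell, hm⟩
      cases l with
      | zero => exact Or.inl ⟨by simpa using hcell, by simpa using hm⟩
      | succ l =>
        refine Or.inr ⟨l, by simpa using hl, by simpa using hcell, ?_⟩
        have h : y + (j + 1) + l = y + j + (l + 1 : Nat) := by push_cast; ring
        rwa [h]

lemma pvScanPiece_iff (piece : List (List String)) (x y i : Int) :
    pvScanPiece piece x y i = true ↔
      ∃ k : Nat, ∃ h : k < piece.length, ∃ l : Nat, ∃ h2 : l < piece[k].length,
        piece[k][l] = "#" ∧ (x + i + k, y + l) ∈ pvCorners := by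
  induction piece generalizing i with
  | nil => simp [pvScanPiece]
  | cons row rest ih =>
    simp only [pvScanPiece, Bool.or_eq_true, pvScanRow_iff, ih]
    constructor
    · rintro (⟨l, hl, hcell, hm⟩ | ⟨k, hk, l, hl, hcell, hm⟩)
      · exact ⟨0, by simp, l, by simpa using hl, by simpa using hcell, by simpa using hm⟩
      · refine ⟨k + 1, by simpa using hk, l, by simpa using hl, by simpa using hcell, ?_⟩
        have h : x + i + (k + 1 : Nat) = x + (i + 1) + k := by push_cast; ring
        rwa [h]
    · rintro ⟨k, hk, l, hl, hcell, hm⟩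
      cases k with
      | zero =>
        refine Or.inl ⟨l, by simpa using hl, by simpa using hcell, ?_⟩
        simpa using hm
      | succ k =>
        refine Or.inr ⟨k, by simpa using hk, l, by simpa using hl, by simpa using hcell, ?_⟩
        have h : x + (i + 1) + k = x + i + (k + 1 : Nat) := by push_cast; ring
        rwa [h]

lemma is_corner_alt_iff (piece : List (List String)) (x y : Int) :
    is_corner_alt piece x y = true ↔
      ∃ c ∈ pvCorners, 0 ≤ c.1 - x ∧ c.1 - x < (piece.length : Int) ∧
        0 ≤ c.2 - y ∧ c.2 - y < ((piece.getD (c.1 - x).toNat []).length : Int) ∧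
        (piece.getD (c.1 - x).toNat []).getD (c.2 - y).toNat "" = "#" := by
  show ([((1 : Int), (1 : Int)), (1, 20), (20, 1), (20, 20)].any _) = true ↔ _
  rw [List.any_eq_true]
  constructor
  · rintro ⟨c, hc, hp⟩
    simp only [Bool.and_eq_true, decide_eq_true_eq, beq_iff_eq] at hp
    obtain ⟨⟨h1, h2⟩, ⟨h3, h4⟩, h5⟩ := hp
    exact ⟨c, hc, h1, h2, h3, h4, h5⟩
  · rintro ⟨c, hc, h1, h2, h3, h4, h5⟩
    refine ⟨c, hc, ?_⟩
    simp only [Bool.and_eq_true, decide_eq_true_eq, beq_iff_eq]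
    exact ⟨⟨h1, h2⟩, ⟨h3, h4⟩, h5⟩

theorem is_corner_eq_alt (piece : List (List String)) (x y : Int) :
    is_corner piece x y = is_corner_alt piece x y := by
  rw [Bool.eq_iff_iff]
  unfold is_corner
  rw [pvScanPiece_iff, is_corner_alt_iff]
  constructor
  · rintro ⟨k, hk, l, hl, hcell, hm⟩
    refine ⟨(x + 0 + k, y + l), hm, ?_, ?_, ?_, ?_, ?_⟩
    · show (0:Int) ≤ (x + 0 + (k:Int)) - x; omega
    · show (x + 0 + (k:Int)) - x < (piece.length : Int); omega
    · show (0:Int) ≤ (y + (l:Int)) - y; omega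
    · have h2 : ((x + 0 + (k:Int)) - x).toNat = k := by omega
      show (y + (l:Int)) - y < _
      rw [h2, List.getD_eq_getElem piece [] hk]
      omega
    · have h2 : ((x + 0 + (k:Int)) - x).toNat = k := by omega
      have h3 : ((y + (l:Int)) - y).toNat = l := by omega
      show (piece.getD ((x + 0 + (k:Int)) - x).toNat []).getD ((y + (l:Int)) - y).toNat "" = "#"
      rw [h2, h3, List.getD_eq_getElem piece [] hk, List.getD_eq_getElem _ _ hl]
      exact hcell
  · rintro ⟨c, hc, h1, h2, h3, h4, h5⟩
    set k : Nat := (c.1 - x).toNat with hkdef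
    have hk : k < piece.length := by omega
    rw [List.getD_eq_getElem piece [] hk] at h4 h5
    set l : Nat := (c.2 - y).toNat with hldef
    have hl : l < piece[k].length := by omega
    have hcell : piece[k][l] = "#" := by rw [← h5, List.getD_eq_getElem _ _ hl]
    have hcoord : ((x + 0 + (k : Int), y + (l : Int)) : Int × Int) = c := by
      refine Prod.ext ?_ ?_ <;> simp [hkdef, hldef] <;> omega
    exact ⟨k, hk, l, hl, hcell, by rw [hcoord]; exact hc⟩

-- ===== VERDICT (by name: the statement is the Claim_ definition above) =====
theorem is_corner_spec : Claim_equal_is_corner := by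
  intro piece x y _
  unfold Spec_is_corner
  exact is_corner_eq_alt piece x y
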